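-- pv_equiv track=rewrite | github.com/Zack-Dugue/Project156b-Red-Door-Sandwich | xray14_reformater.py | xray14findings
-- ===== SOURCE A (Python) =====
-- findings_list = ['No Finding','Enlarged Cardiomediastinum','Cardiomegaly','Lung Opacity','Pneumonia','Pleural Effusion','Pleural Other','Fracture','Support Devices']
--
-- def xray14findings(labels):
--     label_arr = labels.split('|')
--     new_arr = []
--     for item in findings_list:
--         if item in label_arr:
--             new_arr.append(1)
--         else:
--             new_arr.append(-1)
--
--     return new_arr
-- ===== SOURCE B (Python) =====
-- findings_index = {'No Finding': 0, 'Enlarged Cardiomediastinum': 1, 'Cardiomegaly': 2,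
--                   'Lung Opacity': 3, 'Pneumonia': 4, 'Pleural Effusion': 5,
--                   'Pleural Other': 6, 'Fracture': 7, 'Support Devices': 8}
--
-- def xray14findings(labels):
--     new_arr = [-1] * 9
--     for token in labels.split('|'):
--         i = findings_index.get(token)
--         if i is not None:
--             new_arr[i] = 1
--     return new_arr
-- ===== Notes on version B (the rewrite author's own statement) =====
-- stated objective: alternative
-- what changed: Instead of scanning the split label list once per finding (membership test per each of the 9 findings), B pre-fills [-1]*9 and makes one pass over the split tokens, setting positions through a name-to-index dict.
import Mathlib
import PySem

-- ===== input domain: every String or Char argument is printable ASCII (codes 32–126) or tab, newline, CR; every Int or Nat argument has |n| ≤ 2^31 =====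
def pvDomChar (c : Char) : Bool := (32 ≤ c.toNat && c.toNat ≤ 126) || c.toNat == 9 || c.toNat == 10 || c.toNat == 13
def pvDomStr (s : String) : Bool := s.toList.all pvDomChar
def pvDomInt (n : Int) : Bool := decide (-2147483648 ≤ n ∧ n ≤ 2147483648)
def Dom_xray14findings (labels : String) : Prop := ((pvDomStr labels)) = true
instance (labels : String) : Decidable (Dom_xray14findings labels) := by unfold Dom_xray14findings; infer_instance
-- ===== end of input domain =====

-- B replaces A's scan of the label list once per finding by one pass over the split
-- tokens, setting positions in a prefilled [-1]*9 via a name→index table (objective: alternative).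

-- ===== PORT A =====
-- sep "|" ≠ "" means split? always returns some; .getD [] is exact for labels.split('|')
def findingsList : List String :=
  ["No Finding", "Enlarged Cardiomediastinum", "Cardiomegaly", "Lung Opacity",
   "Pneumonia", "Pleural Effusion", "Pleural Other", "Fracture", "Support Devices"]

def xray14findings (labels : String) : List Int :=
  let label_arr := (PySem.Str.split? labels "|").getD []
  findingsList.foldl (fun new_arr item =>
    if label_arr.contains item then new_arr ++ [1] else new_arr ++ [-1]) []

-- ===== PORT B =====
-- indices are the nonnegative literals 0..8, so the dict stores Nat
def findingsIndex : PySem.Dict String Nat :=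
  PySem.Dict.mk [("No Finding", 0), ("Enlarged Cardiomediastinum", 1), ("Cardiomegaly", 2),
   ("Lung Opacity", 3), ("Pneumonia", 4), ("Pleural Effusion", 5),
   ("Pleural Other", 6), ("Fracture", 7), ("Support Devices", 8)]

def xray14findings_alt (labels : String) : List Int :=
  ((PySem.Str.split? labels "|").getD []).foldl (fun new_arr token =>
    match findingsIndex.get? token with
    | some i => new_arr.set i 1
    | none => new_arr) (List.replicate 9 (-1))

-- ===== PRECONDITION & SPEC =====
def Spec_xray14findings (labels : String) (out : List Int) : Prop := out = xray14findings_alt labels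
instance (labels : String) (out : List Int) : Decidable (Spec_xray14findings labels out) := by unfold Spec_xray14findings; infer_instance

-- ===== CLAIM (what is proved, stated in full; the proofs are below) =====
def Claim_equal_xray14findings : Prop := ∀ (labels : String), Dom_xray14findings labels → Spec_xray14findings labels (xray14findings labels)

-- ===== LEMMAS AND PROOFS =====

-- one step of B's loop turns a map over findingsList into a map with the token marked
theorem step_map (g : String → Int) (t : String) :
    (match findingsIndex.get? t with
     | some i => (findingsList.map g).set i 1
     | none => findingsList.map g)
    = findingsList.map (fun f => if f == t then 1 else g f) := by
  by_cases h0 : t = "No Finding"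
  · subst h0; simp [findingsIndex, findingsList, PySem.Dict.get?_mk_cons]
  by_cases h1 : t = "Enlarged Cardiomediastinum"
  · subst h1; simp [findingsIndex, findingsList, PySem.Dict.get?_mk_cons]
  by_cases h2 : t = "Cardiomegaly"
  · subst h2; simp [findingsIndex, findingsList, PySem.Dict.get?_mk_cons]
  by_cases h3 : t = "Lung Opacity"
  · subst h3; simp [findingsIndex, findingsList, PySem.Dict.get?_mk_cons]
  by_cases h4 : t = "Pneumonia"
  · subst h4; simp [findingsIndex, findingsList, PySem.Dict.get?_mk_cons]
  by_cases h5 : t = "Pleural Effusion"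
  · subst h5; simp [findingsIndex, findingsList, PySem.Dict.get?_mk_cons]
  by_cases h6 : t = "Pleural Other"
  · subst h6; simp [findingsIndex, findingsList, PySem.Dict.get?_mk_cons]
  by_cases h7 : t = "Fracture"
  · subst h7; simp [findingsIndex, findingsList, PySem.Dict.get?_mk_cons]
  by_cases h8 : t = "Support Devices"
  · subst h8; simp [findingsIndex, findingsList, PySem.Dict.get?_mk_cons]
  have hnone : findingsIndex.get? t = none := by
    simp [findingsIndex, PySem.Dict.get?_mk_cons, Ne.symm h0, Ne.symm h1, Ne.symm h2,
      Ne.symm h3, Ne.symm h4, Ne.symm h5, Ne.symm h6, Ne.symm h7, Ne.symm h8, PySem.Dict.get?]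
  simp [hnone, findingsList, Ne.symm h0, Ne.symm h1, Ne.symm h2, Ne.symm h3, Ne.symm h4,
    Ne.symm h5, Ne.symm h6, Ne.symm h7, Ne.symm h8]

-- B's loop invariant: folding the tokens over any map of findingsList marks the seen findings
theorem loop_inv (ts : List String) (g : String → Int) :
    ts.foldl (fun new_arr token =>
      match findingsIndex.get? token with
      | some i => new_arr.set i 1
      | none => new_arr) (findingsList.map g)
    = findingsList.map (fun f => if ts.contains f then 1 else g f) := by
  induction ts generalizing g with
  | nil => simp
  | cons t ts ih =>
    rw [List.foldl_cons, step_map g t, ih]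
    apply List.map_congr_left
    intro f _
    by_cases h : f = t <;> simp [h]

-- ===== VERDICT (by name: the statement is the Claim_ definition above) =====
-- A's append-accumulating for-loop over findingsList is a map over findingsList
theorem foldA_eq_map (P : String → Bool) (l : List String) (acc : List Int) :
    l.foldl (fun a item => if P item then a ++ [1] else a ++ [-1]) acc
    = acc ++ l.map (fun f => if P f then (1 : Int) else -1) := by
  induction l generalizing acc with
  | nil => simp
  | cons x l ih => by_cases h : P x <;> simp [h, ih]

theorem xray14findings_spec : Claim_equal_xray14findings := by
  intro labels _
  unfold Spec_xray14findings xray14findings xray14findings_alt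
  have hrep : (List.replicate 9 (-1) : List Int) = findingsList.map (fun _ => -1) := by
    simp [findingsList]
  rw [hrep, loop_inv, foldA_eq_map]
  simp
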